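-- pv_equiv track=rewrite | github.com/huagruay-git/HGCameraCounter | shared/updater.py | select_primary_asset
-- ===== SOURCE A (Python) =====
-- from typing import Dict, Optional, Tuple
--
-- def select_primary_asset(metadata: Dict) -> Optional[Dict]:
--     assets = metadata.get('assets') or []
--     if not assets:
--         return None
--     # Prefer zip or exe, else first
--     for ext in ('.zip', '.exe', '.tar.gz'):
--         for a in assets:
--             if a.get('name', '').endswith(ext):
--                 return a
--     return assets[0]
-- ===== SOURCE B (Python) =====
-- _EXT_PRIORITY = ('.zip', '.exe', '.tar.gz')
--
-- def select_primary_asset(metadata):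
--     assets = metadata.get('assets') or []
--     if not assets:
--         return None
--     best = None
--     best_rank = len(_EXT_PRIORITY)
--     for a in assets:
--         name = a.get('name', '')
--         rank = next((i for i, ext in enumerate(_EXT_PRIORITY) if name.endswith(ext)),
--                     len(_EXT_PRIORITY))
--         if rank < best_rank:
--             best, best_rank = a, rank
--     return best if best_rank < len(_EXT_PRIORITY) else assets[0]
-- ===== Notes on version B (the rewrite author's own statement) =====
-- stated objective: alternative
-- what changed: Replaces A's three successive scans of the asset list (one per preferred extension) by a single pass that assigns each asset a priority rank and keeps the first asset with the lowest rank, falling back to the first asset when no extension matches.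
import Mathlib
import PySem

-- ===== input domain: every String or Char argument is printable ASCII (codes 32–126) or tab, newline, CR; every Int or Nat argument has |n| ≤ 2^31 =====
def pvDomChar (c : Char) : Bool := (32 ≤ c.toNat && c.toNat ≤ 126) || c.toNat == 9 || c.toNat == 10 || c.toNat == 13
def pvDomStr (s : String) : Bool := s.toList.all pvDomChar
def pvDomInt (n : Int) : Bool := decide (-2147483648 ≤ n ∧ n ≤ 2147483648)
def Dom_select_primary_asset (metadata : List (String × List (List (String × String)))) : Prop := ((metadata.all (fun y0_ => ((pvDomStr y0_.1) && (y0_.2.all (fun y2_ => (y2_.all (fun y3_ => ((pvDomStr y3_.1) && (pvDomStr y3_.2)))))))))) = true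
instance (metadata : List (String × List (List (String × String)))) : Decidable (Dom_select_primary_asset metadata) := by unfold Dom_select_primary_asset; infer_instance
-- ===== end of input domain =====

-- B replaces A's three scans of the asset list (one per preferred extension) by one
-- pass that tracks the best-priority asset seen so far; objective: alternative/simpler.

-- ===== PORT A =====

-- `a.get('name', '').endswith(ext)`
def pvAMatches (ext : String) (a : List (String × String)) : Bool :=
  PySem.Str.endswith ((PySem.Dict.mk a).getD "name" "") ext

-- inner loop: `for a in assets: if a.get('name','').endswith(ext): return a`
def pvALoopAssets (ext : String) : List (List (String × String)) → Option (List (String × String))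
  | [] => none
  | a :: rest => if pvAMatches ext a then some a else pvALoopAssets ext rest

-- outer loop: `for ext in ('.zip', '.exe', '.tar.gz'):`
def pvALoopExts (assets : List (List (String × String))) : List String → Option (List (String × String))
  | [] => none
  | e :: rest =>
    match pvALoopAssets e assets with
    | some a => some a
    | none => pvALoopExts assets rest

def select_primary_asset (metadata : List (String × List (List (String × String)))) : Option (List (String × String)) :=
  let assets := ((PySem.Dict.mk metadata).get? "assets").getD []   -- metadata.get('assets') or []
  if assets = [] then none
  else
    match pvALoopExts assets [".zip", ".exe", ".tar.gz"] with
    | some a => some a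
    | none => assets[0]?

-- ===== PORT B =====

-- rank = index of the first extension in _EXT_PRIORITY that name endswith, else 3
def pvBRank (a : List (String × String)) : Nat :=
  let name := (PySem.Dict.mk a).getD "name" ""
  if PySem.Str.endswith name ".zip" then 0
  else if PySem.Str.endswith name ".exe" then 1
  else if PySem.Str.endswith name ".tar.gz" then 2
  else 3

-- `for a in assets: … if rank < best_rank: best, best_rank = a, rank`
def pvBLoop : List (List (String × String)) → Nat → Option (List (String × String)) → Nat × Option (List (String × String))
  | [], r, b => (r, b)
  | a :: rest, r, b =>
    if pvBRank a < r then pvBLoop rest (pvBRank a) (some a) else pvBLoop rest r b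

def select_primary_asset_alt (metadata : List (String × List (List (String × String)))) : Option (List (String × String)) :=
  let assets := ((PySem.Dict.mk metadata).get? "assets").getD []
  if assets = [] then none
  else
    let rb := pvBLoop assets 3 none
    if rb.1 < 3 then rb.2 else assets[0]?

-- ===== PRECONDITION & SPEC =====
def Spec_select_primary_asset (metadata : List (String × List (List (String × String)))) (out : Option (List (String × String))) : Prop := out = select_primary_asset_alt metadata
instance (metadata : List (String × List (List (String × String)))) (out : Option (List (String × String))) : Decidable (Spec_select_primary_asset metadata out) := by unfold Spec_select_primary_asset; infer_instance

-- ===== CLAIM (what is proved, stated in full; the proofs are below) =====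
def Claim_equal_select_primary_asset : Prop := ∀ (metadata : List (String × List (List (String × String)))), Dom_select_primary_asset metadata → Spec_select_primary_asset metadata (select_primary_asset metadata)

-- ===== LEMMAS AND PROOFS =====

-- minimal rank in a list of assets (3 for the empty list)
def pvMinR : List (List (String × String)) → Nat
  | [] => 3
  | a :: rest => min (pvBRank a) (pvMinR rest)

theorem pvBRank_le_three (a : List (String × String)) : pvBRank a ≤ 3 := by
  simp only [pvBRank]
  split_ifs <;> omega

theorem pvMinR_le_three (xs : List (List (String × String))) : pvMinR xs ≤ 3 := by
  induction xs with
  | nil => simp [pvMinR]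
  | cons a t ih => simp [pvMinR]; omega

theorem pvMinR_le_of_mem {xs : List (List (String × String))} {a : List (String × String)}
    (h : a ∈ xs) : pvMinR xs ≤ pvBRank a := by
  induction xs with
  | nil => cases h
  | cons x t ih =>
    rcases List.mem_cons.mp h with h | h
    · subst h; simp [pvMinR]
    · simp [pvMinR]; exact Or.inr (ih h)

theorem pvMinR_ge {xs : List (List (String × String))} {k : Nat}
    (hk : k ≤ 3) (h : ∀ a ∈ xs, k ≤ pvBRank a) : k ≤ pvMinR xs := by
  induction xs with
  | nil => simpa [pvMinR] using hk
  | cons x t ih =>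
    have h1 := h x (by simp)
    have h2 := ih (fun a ha => h a (by simp [ha]))
    simp [pvMinR]; omega

-- B's loop computes the running minimum and the FIRST asset achieving it
theorem pvBLoop_spec (xs : List (List (String × String))) :
    ∀ (r : Nat) (b : Option (List (String × String))), r ≤ 3 →
    pvBLoop xs r b =
      (min r (pvMinR xs),
       if pvMinR xs < r then xs.find? (fun a => pvBRank a == pvMinR xs) else b) := by
  induction xs with
  | nil =>
    intro r b hr
    have : min r (pvMinR []) = r := by simp [pvMinR]; omega
    rw [pvBLoop, this, if_neg (by simp [pvMinR]; omega)]
  | cons a t ih =>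
    intro r b hr
    by_cases h : pvBRank a < r
    · rw [pvBLoop, if_pos h, ih _ _ (by omega)]
      by_cases ht : pvMinR t < pvBRank a
      · have hm : pvMinR (a :: t) = pvMinR t := by simp [pvMinR]; omega
        rw [hm, if_pos ht, if_pos (by omega),
          show min r (pvMinR t) = min (pvBRank a) (pvMinR t) by omega,
          show min (pvBRank a) (pvMinR t) = pvMinR t by omega,
          List.find?_cons_of_neg (by simp; omega)]
      · have hm : pvMinR (a :: t) = pvBRank a := by simp [pvMinR]; omega
        rw [hm, if_neg ht, if_pos h,
          show min r (pvBRank a) = min (pvBRank a) (pvMinR t) by omega,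
          show min (pvBRank a) (pvMinR t) = pvBRank a by omega,
          List.find?_cons_of_pos (by simp)]
    · rw [pvBLoop, if_neg h, ih _ _ hr]
      have hra : r ≤ pvBRank a := by omega
      have hm : pvMinR (a :: t) = min (pvBRank a) (pvMinR t) := rfl
      by_cases ht : pvMinR t < r
      · rw [hm, if_pos ht, if_pos (by omega),
          show min r (pvMinR t) = min r (min (pvBRank a) (pvMinR t)) by omega,
          show min (pvBRank a) (pvMinR t) = pvMinR t by omega,
          List.find?_cons_of_neg (by simp; omega)]
      · rw [hm, if_neg ht, if_neg (by omega),
          show min r (pvMinR t) = min r (min (pvBRank a) (pvMinR t)) by omega]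

-- ranks versus A's endswith tests
theorem pvRank_zero (a : List (String × String)) : (pvBRank a == 0) = pvAMatches ".zip" a := by
  unfold pvBRank pvAMatches
  cases h0 : PySem.Str.endswith ((PySem.Dict.mk a).getD "name" "") ".zip" <;>
    cases h1 : PySem.Str.endswith ((PySem.Dict.mk a).getD "name" "") ".exe" <;>
    cases h2 : PySem.Str.endswith ((PySem.Dict.mk a).getD "name" "") ".tar.gz" <;>
    simp only [h0, h1, h2, if_true, if_false, Bool.false_eq_true] <;> rfl

theorem pvRank_one (a : List (String × String)) (h : pvBRank a ≠ 0) :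
    (pvBRank a == 1) = pvAMatches ".exe" a := by
  unfold pvBRank pvAMatches
  unfold pvBRank at h
  cases h0 : PySem.Str.endswith ((PySem.Dict.mk a).getD "name" "") ".zip" <;>
    cases h1 : PySem.Str.endswith ((PySem.Dict.mk a).getD "name" "") ".exe" <;>
    cases h2 : PySem.Str.endswith ((PySem.Dict.mk a).getD "name" "") ".tar.gz" <;>
    simp only [h0, h1, h2, if_true, if_false, Bool.false_eq_true] at h ⊢ <;>
    first | rfl | omega

theorem pvRank_two (a : List (String × String)) (h : pvBRank a ≠ 0) (h' : pvBRank a ≠ 1) :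
    (pvBRank a == 2) = pvAMatches ".tar.gz" a := by
  unfold pvBRank pvAMatches
  unfold pvBRank at h h'
  cases h0 : PySem.Str.endswith ((PySem.Dict.mk a).getD "name" "") ".zip" <;>
    cases h1 : PySem.Str.endswith ((PySem.Dict.mk a).getD "name" "") ".exe" <;>
    cases h2 : PySem.Str.endswith ((PySem.Dict.mk a).getD "name" "") ".tar.gz" <;>
    simp only [h0, h1, h2, if_true, if_false, Bool.false_eq_true] at h h' ⊢ <;>
    first | rfl | omega

theorem pvALoopAssets_eq_find? (e : String) (xs : List (List (String × String))) :
    pvALoopAssets e xs = xs.find? (pvAMatches e) := by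
  induction xs with
  | nil => rfl
  | cons a t ih => rw [pvALoopAssets, List.find?_cons]; cases h : pvAMatches e a <;> simp [ih]

theorem pvFind?_congr_mem {xs : List (List (String × String))}
    {p q : List (String × String) → Bool} (h : ∀ a ∈ xs, p a = q a) :
    xs.find? p = xs.find? q := by
  induction xs with
  | nil => rfl
  | cons a t ih =>
    rw [List.find?_cons, List.find?_cons, h a (by simp)]
    cases q a
    · exact ih (fun x hx => h x (by simp [hx]))
    · rfl

theorem pvFind?_rank_none {xs : List (List (String × String))} {k : Nat}
    (h : xs.find? (fun a => pvBRank a == k) = none) : ∀ a ∈ xs, pvBRank a ≠ k := by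
  intro a ha
  have := List.find?_eq_none.mp h a ha
  simpa using this

-- if the minimum is realised (< 3), find? at the minimum succeeds
theorem pvFind?_min_isSome {xs : List (List (String × String))} (h : pvMinR xs < 3) :
    (xs.find? (fun a => pvBRank a == pvMinR xs)).isSome := by
  cases hf : xs.find? (fun a => pvBRank a == pvMinR xs) with
  | some a => rfl
  | none =>
    exfalso
    have hne := pvFind?_rank_none hf
    have : pvMinR xs + 1 ≤ pvMinR xs := by
      refine pvMinR_ge (by omega) (fun a ha => ?_)
      have := hne a ha
      have := pvMinR_le_of_mem ha
      omega
    omega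

-- A's nested loops return the first asset of minimal rank (none iff no rank < 3)
theorem pvALoop_eq (xs : List (List (String × String))) :
    pvALoopExts xs [".zip", ".exe", ".tar.gz"] =
      (if pvMinR xs < 3 then xs.find? (fun a => pvBRank a == pvMinR xs) else none) := by
  simp only [pvALoopExts, pvALoopAssets_eq_find?]
  rw [pvFind?_congr_mem (p := pvAMatches ".zip") (q := fun a => pvBRank a == 0)
    (fun a _ => (pvRank_zero a).symm)]
  cases h0 : xs.find? (fun a => pvBRank a == 0) with
  | some a =>
    have hmem := List.mem_of_find?_eq_some h0
    have hr : pvBRank a = 0 := by simpa using List.find?_some h0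
    have hmin : pvMinR xs = 0 := by
      have := pvMinR_le_of_mem hmem; omega
    rw [hmin, if_pos (by omega), h0]
  | none =>
    have hne0 := pvFind?_rank_none h0
    rw [pvFind?_congr_mem (p := pvAMatches ".exe") (q := fun a => pvBRank a == 1)
      (fun a ha => (pvRank_one a (hne0 a ha)).symm)]
    cases h1 : xs.find? (fun a => pvBRank a == 1) with
    | some a =>
      have hmem := List.mem_of_find?_eq_some h1
      have hr : pvBRank a = 1 := by simpa using List.find?_some h1
      have hmin : pvMinR xs = 1 := by
        have := pvMinR_le_of_mem hmem
        have := pvMinR_ge (k := 1) (by omega) (fun a ha => by have := hne0 a ha; omega)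
        omega
      rw [hmin, if_pos (by omega), h1]
    | none =>
      have hne1 := pvFind?_rank_none h1
      rw [pvFind?_congr_mem (p := pvAMatches ".tar.gz") (q := fun a => pvBRank a == 2)
        (fun a ha => (pvRank_two a (hne0 a ha) (hne1 a ha)).symm)]
      cases h2 : xs.find? (fun a => pvBRank a == 2) with
      | some a =>
        have hmem := List.mem_of_find?_eq_some h2
        have hr : pvBRank a = 2 := by simpa using List.find?_some h2
        have hmin : pvMinR xs = 2 := by
          have := pvMinR_le_of_mem hmem
          have := pvMinR_ge (k := 2) (by omega)
            (fun a ha => by have := hne0 a ha; have := hne1 a ha; omega)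
          omega
        rw [hmin, if_pos (by omega), h2]
      | none =>
        have hne2 := pvFind?_rank_none h2
        have hge3 : 3 ≤ pvMinR xs :=
          pvMinR_ge (by omega)
            (fun a ha => by
              have := hne0 a ha; have := hne1 a ha; have := hne2 a ha
              have := pvBRank_le_three a; omega)
        rw [if_neg (by omega)]

-- ===== VERDICT (by name: the statement is the Claim_ definition above) =====
theorem select_primary_asset_spec : Claim_equal_select_primary_asset := by
  intro metadata _
  unfold Spec_select_primary_asset select_primary_asset select_primary_asset_alt
  set assets := ((PySem.Dict.mk metadata).get? "assets").getD [] with hassets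
  by_cases hempty : assets = []
  · simp [hempty]
  · rw [if_neg hempty, if_neg hempty, pvBLoop_spec _ _ _ (by omega), pvALoop_eq]
    have h3 := pvMinR_le_three assets
    by_cases hm : pvMinR assets < 3
    · rw [if_pos hm, show min 3 (pvMinR assets) = pvMinR assets by omega, if_pos hm]
      obtain ⟨a, ha⟩ := Option.isSome_iff_exists.mp (pvFind?_min_isSome hm)
      rw [ha]
    · rw [if_neg hm]
      rw [show min 3 (pvMinR assets) = 3 by omega, if_neg (by omega)]
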